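-- pv_equiv track=rewrite | github.com/ohilikeit/Coding_Test_Practice | 프로그래머스/unrated/133499. 옹알이 （2）/옹알이 （2）.py | solution
-- ===== SOURCE A (Python) =====
-- def solution(babbling):
--     answer = 0
--     ables = ['aya', 'ye', 'woo', 'ma']
--     for babble in babbling:
--         ans = ""
--         ans_list = []
--         for j in babble:
--             ans += j
--             if ans in ables:
--                 ans_list.append(ans)
--                 ans = ""
--         if len(ans) == 0:
--             a = 0
--             for i in range(1, len(ans_list)):
--                 if ans_list[i-1] == ans_list[i]:
--                     a += 1
--             if a >= 1:
--                 continue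
--             else:
--                 answer += 1
--         else:
--             continue
--     return answer
-- ===== SOURCE B (Python) =====
-- SOUNDS = ('aya', 'ye', 'woo', 'ma')
--
-- def _ok(s, prev=None):
--     # recursive descent: strip one allowed sound (never the previous one) per step
--     if not s:
--         return True
--     for t in SOUNDS:
--         if t != prev and s.startswith(t):
--             return _ok(s[len(t):], t)
--     return False
--
-- def solution(babbling):
--     return sum(_ok(b) for b in babbling)
-- ===== Notes on version B (the rewrite author's own statement) =====
-- stated objective: simpler
-- what changed: Replaces A's char-by-char accumulator parse plus a separate second indexed pass counting adjacent repeated tokens with a single recursive-descent tokenizer that strips one allowed sound per step and forbids repeating the previous sound inline.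
import Mathlib
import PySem

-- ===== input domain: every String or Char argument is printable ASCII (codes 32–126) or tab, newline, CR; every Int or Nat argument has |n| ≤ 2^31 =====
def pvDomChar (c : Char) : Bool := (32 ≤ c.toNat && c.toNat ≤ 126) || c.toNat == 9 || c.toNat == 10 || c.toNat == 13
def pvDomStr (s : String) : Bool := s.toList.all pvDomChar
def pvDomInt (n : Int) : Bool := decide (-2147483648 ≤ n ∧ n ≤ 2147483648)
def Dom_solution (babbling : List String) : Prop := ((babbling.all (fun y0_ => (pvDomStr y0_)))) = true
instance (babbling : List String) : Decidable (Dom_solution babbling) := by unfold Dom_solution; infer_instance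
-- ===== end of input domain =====

-- B replaces A's accumulator parse + second adjacency pass by one recursive-descent tokenizer (simpler; return value only, no mutation).

-- ===== PORT A =====
-- ables = ['aya', 'ye', 'woo', 'ma']  (strings handled as List Char; exact on the ASCII domain)
def ablesP : List (List Char) := [['a','y','a'], ['y','e'], ['w','o','o'], ['m','a']]

-- the body of A's inner `for j in babble` loop, state = (ans, ans_list)
def stepA (p : List Char × List (List Char)) (j : Char) : List Char × List (List Char) :=
  let ans := p.1 ++ [j]
  if ans ∈ ablesP then ([], p.2 ++ [ans]) else (ans, p.2)

-- a = 0; for i in range(1, len(ans_list)): if ans_list[i-1] == ans_list[i]: a += 1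
def aCountA (l : List (List Char)) : Int :=
  (PySem.List.pyRange 1 (l.length : Int) 1).foldl
    (fun a i => if PySem.List.pyGetD l (i - 1) [] = PySem.List.pyGetD l i [] then a + 1 else a) 0

def solution (babbling : List String) : Int :=
  babbling.foldl (fun answer babble =>
    let st := babble.toList.foldl stepA ([], [])
    if st.1.length = 0 then
      if aCountA st.2 ≥ 1 then answer else answer + 1
    else answer) 0

-- ===== PORT B =====
-- SOUNDS = ('aya', 'ye', 'woo', 'ma')
def soundsB : List (List Char) := [['a','y','a'], ['y','e'], ['w','o','o'], ['m','a']]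

-- _ok(s, prev): the first-match for-loop is ported as List.find?
def okB (s : List Char) (prev : Option (List Char)) : Bool :=
  if h0 : s = [] then true
  else
    match hf : soundsB.find? (fun t => (some t != prev) && t.isPrefixOf s) with
    | none => false
    | some t => okB (s.drop t.length) (some t)
termination_by s.length
decreasing_by
  have ht := List.mem_of_find?_eq_some hf
  have h1 : 1 ≤ t.length := by
    simp only [soundsB, List.mem_cons, List.not_mem_nil, or_false] at ht
    rcases ht with rfl | rfl | rfl | rfl <;> simp
  have h2 : 0 < s.length := List.length_pos_iff.mpr h0
  simp only [List.length_drop]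
  omega

def solution_alt (babbling : List String) : Int :=
  babbling.foldl (fun acc b => acc + (if okB b.toList none then 1 else 0)) 0

-- ===== PRECONDITION & SPEC =====
def Spec_solution (babbling : List String) (out : Int) : Prop := out = solution_alt babbling
instance (babbling : List String) (out : Int) : Decidable (Spec_solution babbling out) := by unfold Spec_solution; infer_instance

-- ===== CLAIM (what is proved, stated in full; the proofs are below) =====
def Claim_equal_solution : Prop := ∀ (babbling : List String), Dom_solution babbling → Spec_solution babbling (solution babbling)

-- ===== LEMMAS AND PROOFS =====

-- A's inner fold only ever appends to the token accumulator
lemma stepA_acc (s : List Char) (p : List Char) (acc : List (List Char)) :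
    List.foldl stepA (p, acc) s
      = ((List.foldl stepA (p, []) s).1, acc ++ (List.foldl stepA (p, []) s).2) := by
  induction s generalizing p acc with
  | nil => simp
  | cons c s ih =>
    simp only [List.foldl_cons, stepA]
    split_ifs with h
    · rw [ih [] (acc ++ [p ++ [c]]), ih [] ([] ++ [p ++ [c]])]
      simp
    · rw [ih (p ++ [c]) acc, ih (p ++ [c]) []]

-- consuming a complete allowed sound resets ans and records the token
lemma stepA_consume (t : List Char) (ht : t ∈ ablesP) (s : List Char) (acc : List (List Char)) :
    List.foldl stepA ([], acc) (t ++ s) = List.foldl stepA ([], acc ++ [t]) s := by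
  simp only [ablesP, List.mem_cons, List.not_mem_nil, or_false] at ht
  rcases ht with rfl | rfl | rfl | rfl <;>
    simp [stepA, ablesP]

-- if no proper extension of ans ever becomes an allowed sound, the fold just accumulates
lemma stepA_stuck (s : List Char) (p : List Char) (acc : List (List Char))
    (H : ∀ j, j < s.length → p ++ s.take (j + 1) ∉ ablesP) :
    List.foldl stepA (p, acc) s = (p ++ s, acc) := by
  induction s generalizing p with
  | nil => simp
  | cons c s ih =>
    simp only [List.foldl_cons, stepA]
    rw [if_neg (by have := H 0 (by simp); simpa using this)]
    rw [ih (p ++ [c]) (fun j hj => by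
      have := H (j + 1) (by simp; omega)
      simpa [List.append_assoc] using this)]
    simp

-- the allowed sounds are prefix-free: only one can be a prefix of any string
lemma sounds_unique {t t' : List Char} (ht : t ∈ ablesP) (ht' : t' ∈ ablesP)
    {s : List Char} (h1 : t <+: s) (h2 : t' <+: s) : t = t' := by
  have hcomp := List.prefix_or_prefix_of_prefix h1 h2
  simp only [ablesP, List.mem_cons, List.not_mem_nil, or_false] at ht ht'
  rcases ht with rfl | rfl | rfl | rfl <;> rcases ht' with rfl | rfl | rfl | rfl <;>
    revert hcomp <;> decide

lemma find?_unique {α : Type} (L : List α) (p : α → Bool) (t : α) (ht : t ∈ L)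
    (hu : ∀ x ∈ L, p x = true → x = t) :
    L.find? p = if p t then some t else none := by
  split_ifs with hp
  · cases hfind : L.find? p with
    | none => exact absurd (List.find?_eq_none.mp hfind t ht) (by simp [hp])
    | some x => rw [hu x (List.mem_of_find?_eq_some hfind) (List.find?_some hfind)]
  · exact List.find?_eq_none.mpr (fun x hx hpx => hp (hu x hx hpx ▸ hpx))

-- main per-string lemma: okB accepts iff A's parse consumes everything with no adjacent repeat
lemma okB_iff (n : ℕ) : ∀ s : List Char, s.length ≤ n → ∀ prev : Option (List Char),
    okB s prev = true ↔
      ((List.foldl stepA ([], []) s).1 = [] ∧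
        (prev.toList ++ (List.foldl stepA ([], []) s).2).IsChain (· ≠ ·)) := by
  induction n with
  | zero =>
    intro s hs prev
    have : s = [] := List.length_eq_zero_iff.mp (Nat.le_zero.mp hs)
    subst this
    rw [okB]
    cases prev <;> simp [List.IsChain.nil, List.IsChain.singleton]
  | succ n ih =>
    intro s hs prev
    by_cases h0 : s = []
    · subst h0; rw [okB]; cases prev <;> simp [List.IsChain.nil, List.IsChain.singleton]
    · cases hpre : ablesP.find? (fun t => t.isPrefixOf s) with
      | none =>
        -- no sound is a prefix of s: A gets stuck with nonempty ans, okB finds nothing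
        have hnop : ∀ t ∈ ablesP, ¬ t <+: s := by
          intro t htm htp
          have := List.find?_eq_none.mp hpre t htm
          simp [List.isPrefixOf_iff_prefix] at this
          exact this htp
        rw [okB]
        rw [dif_neg h0]
        have hfn : soundsB.find? (fun t => (some t != prev) && t.isPrefixOf s) = none := by
          refine List.find?_eq_none.mpr (fun t htm => ?_)
          have : ¬ t <+: s := hnop t (by simpa [soundsB, ablesP] using htm)
          simp [List.isPrefixOf_iff_prefix, this]
        rw [hfn]
        have hstuck : List.foldl stepA (([] : List Char), ([] : List (List Char))) s = (s, []) := by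
          have := stepA_stuck s [] [] (fun j hj hmem => by
            exact hnop _ (by simpa using hmem) (by simpa using List.take_prefix (j + 1) s))
          simpa using this
        simp [hstuck, h0]
      | some t =>
        have htm : t ∈ ablesP := List.mem_of_find?_eq_some hpre
        have htp : t <+: s := by
          have := List.find?_some hpre
          simpa [List.isPrefixOf_iff_prefix] using this
        obtain ⟨s', rfl⟩ := htp
        have ht1 : 1 ≤ t.length := by
          simp only [ablesP, List.mem_cons, List.not_mem_nil, or_false] at htm
          rcases htm with rfl | rfl | rfl | rfl <;> simp
        -- A's parse: first token is t, then parse s'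
        have hA : List.foldl stepA (([] : List Char), ([] : List (List Char))) (t ++ s')
            = ((List.foldl stepA ([], []) s').1, t :: (List.foldl stepA ([], []) s').2) := by
          rw [stepA_consume t htm s' [], List.nil_append, stepA_acc s' [] [t]]
          simp
        -- okB: the find? over soundsB selects t iff t ≠ prev
        have hfind : soundsB.find? (fun x => (some x != prev) && x.isPrefixOf (t ++ s'))
            = if (some t != prev) && t.isPrefixOf (t ++ s') then some t else none := by
          refine find?_unique _ _ t (by simpa [soundsB, ablesP] using htm) ?_
          intro x hx hpx
          simp only [Bool.and_eq_true, List.isPrefixOf_iff_prefix] at hpx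
          exact sounds_unique (by simpa [soundsB, ablesP] using hx) htm hpx.2
            (List.prefix_append t s')
        rw [okB, dif_neg h0, hA]
        by_cases hne : some t ≠ prev
        · have hcond : ((some t != prev) && t.isPrefixOf (t ++ s')) = true := by
            simp [List.isPrefixOf_iff_prefix, List.prefix_append, hne]
          rw [hfind, if_pos hcond]
          show okB ((t ++ s').drop t.length) (some t) = true ↔ _
          rw [show (t ++ s').drop t.length = s' by simp]
          have hs' : s'.length ≤ n := by
            have := hs; simp only [List.length_append] at this; omega
          rw [ih s' hs' (some t)]
          cases prev with
          | none => simp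
          | some p =>
            have hpt : p ≠ t := fun h => hne (by rw [h])
            simp [List.isChain_cons_cons, hpt]
        · -- prev is exactly t: okB refuses, and A's token list starts t :: … after a previous t
          push_neg at hne
          have hcond : ((some t != prev) && t.isPrefixOf (t ++ s')) = false := by
            simp [hne]
          rw [hfind, if_neg (by simp [hcond])]
          show false = true ↔ _
          subst hne
          simp [List.isChain_cons_cons]
  
-- A's adjacency counter is nonnegative and zero iff no adjacent indices coincide
lemma aCount_ge (l : List (List Char)) (L : List Int) (a : Int) :
    a ≤ L.foldl (fun a i => if PySem.List.pyGetD l (i - 1) [] = PySem.List.pyGetD l i [] then a + 1 else a) a := by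
  induction L generalizing a with
  | nil => simp
  | cons i L ih =>
    simp only [List.foldl_cons]
    split_ifs with h
    · exact le_trans (by omega) (ih (a + 1))
    · exact ih a

lemma aCount_zero (l : List (List Char)) (L : List Int) :
    L.foldl (fun a i => if PySem.List.pyGetD l (i - 1) [] = PySem.List.pyGetD l i [] then a + 1 else a) (0 : Int) = 0
      ↔ ∀ i ∈ L, ¬ (PySem.List.pyGetD l (i - 1) [] = PySem.List.pyGetD l i []) := by
  induction L with
  | nil => simp
  | cons i L ih =>
    simp only [List.foldl_cons, List.mem_cons]
    split_ifs with h
    · have hge := aCount_ge l L (0 + 1)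
      constructor
      · intro hz; omega
      · intro hall; exact absurd h (hall i (Or.inl rfl))
    · rw [ih]
      constructor
      · intro hall j hj
        rcases hj with rfl | hj
        · exact h
        · exact hall j hj
      · intro hall j hj; exact hall j (Or.inr hj)

lemma aCountA_nonneg (l : List (List Char)) : 0 ≤ aCountA l := by
  unfold aCountA
  exact aCount_ge l _ 0

lemma aCountA_zero_iff (l : List (List Char)) :
    aCountA l = 0 ↔ l.IsChain (· ≠ ·) := by
  unfold aCountA
  rw [aCount_zero l, List.isChain_iff_getElem]
  constructor
  · intro H k hk
    have hmem : ((k : Int) + 1) ∈ PySem.List.pyRange 1 (l.length : Int) 1 := by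
      rw [PySem.List.mem_pyRange_one]
      constructor <;> [omega; (push_cast; omega)]
    have h := H _ hmem
    rw [show ((k : Int) + 1 - 1) = ((k : ℕ) : Int) by ring] at h
    rw [show ((k : Int) + 1) = ((k + 1 : ℕ) : Int) by push_cast; ring] at h
    rw [PySem.List.pyGetD_natCast, PySem.List.pyGetD_natCast] at h
    rw [List.getD_eq_getElem?_getD, List.getD_eq_getElem?_getD] at h
    rw [List.getElem?_eq_getElem (show k < l.length by omega),
      List.getElem?_eq_getElem hk] at h
    simpa using h
  · intro H i hi heq
    rw [PySem.List.mem_pyRange_one] at hi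
    obtain ⟨h1, h2⟩ := hi
    obtain ⟨k, rfl⟩ : ∃ k : ℕ, i = (k : Int) + 1 := ⟨(i - 1).toNat, by omega⟩
    have hk : k + 1 < l.length := by omega
    rw [show ((k : Int) + 1 - 1) = ((k : ℕ) : Int) by ring] at heq
    rw [show ((k : Int) + 1) = ((k + 1 : ℕ) : Int) by push_cast; ring] at heq
    rw [PySem.List.pyGetD_natCast, PySem.List.pyGetD_natCast] at heq
    rw [List.getD_eq_getElem?_getD, List.getD_eq_getElem?_getD] at heq
    rw [List.getElem?_eq_getElem (show k < l.length by omega),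
      List.getElem?_eq_getElem hk] at heq
    exact H k hk (by simpa using heq)

-- the two per-babble updates agree
lemma per_babble (answer : Int) (babble : String) :
    (let st := babble.toList.foldl stepA ([], [])
     if st.1.length = 0 then
       if aCountA st.2 ≥ 1 then answer else answer + 1
     else answer)
      = answer + (if okB babble.toList none then 1 else 0) := by
  have hok := (okB_iff babble.toList.length babble.toList le_rfl none)
  simp only [Option.toList, List.nil_append] at hok
  set st := babble.toList.foldl stepA ([], []) with hst
  by_cases h1 : st.1 = []
  · by_cases h2 : st.2.IsChain (· ≠ ·)
    · have : okB babble.toList none = true := hok.mpr ⟨h1, h2⟩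
      have hz : aCountA st.2 = 0 := (aCountA_zero_iff st.2).mpr h2
      simp [h1, hz, this]
    · have : okB babble.toList none ≠ true := fun h => h2 (hok.mp h).2
      have hz : aCountA st.2 ≠ 0 := fun h => h2 ((aCountA_zero_iff st.2).mp h)
      have hge := aCountA_nonneg st.2
      have : aCountA st.2 ≥ 1 := by omega
      simp only [h1, List.length_nil, if_pos this]
      simp [show okB babble.toList none = false from by
        cases hb : okB babble.toList none
        · rfl
        · exact absurd (hok.mp hb).2 h2]
  · have : okB babble.toList none = false := by
      cases hb : okB babble.toList none
      · rfl
      · exact absurd (hok.mp hb).1 h1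
    simp [this, List.length_eq_zero_iff, h1]

-- ===== VERDICT (by name: the statement is the Claim_ definition above) =====
theorem solution_spec : Claim_equal_solution := by
  intro babbling hdom
  clear hdom
  unfold Spec_solution solution solution_alt
  induction babbling using List.reverseRecOn with
  | nil => rfl
  | append_singleton bs b ih =>
    rw [List.foldl_append, List.foldl_append, ih]
    simp only [List.foldl_cons, List.foldl_nil]
    exact per_babble _ b
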